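-- pv_equiv track=rewrite | github.com/kroschenko/spp_po11 | reports/Antonyuk/6/src/Task2/SPP_TASK_1.py | process_sequence
-- ===== SOURCE A (Python) =====
-- def process_sequence(seq):
--     if not seq:
--         return "The sequence is empty"
--
--     max_value = max(seq)
--     min_value = min(seq)
--     sum_value = sum(seq)
--
--     product_value = 1
--     for num in seq:
--         product_value *= num
--
--     return max_value, min_value, sum_value, product_value
-- ===== SOURCE B (Python) =====
-- def process_sequence(seq):
--     if not seq:
--         return "The sequence is empty"
--     max_value = min_value = seq[0]
--     sum_value = 0
--     product_value = 1
--     for num in seq: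
--         if num > max_value:
--             max_value = num
--         if num < min_value:
--             min_value = num
--         sum_value += num
--         product_value *= num
--     return max_value, min_value, sum_value, product_value
-- ===== Notes on version B (the rewrite author's own statement) =====
-- stated objective: alternative
-- what changed: Replaces three separate library scans (max, min, sum) plus a product loop with one single-pass fold that maintains all four aggregates simultaneously.
-- outside the precondition, e.g. on process_sequence([]): A returns 'The sequence is empty', B returns 'The sequence is empty'
import Mathlib
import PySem

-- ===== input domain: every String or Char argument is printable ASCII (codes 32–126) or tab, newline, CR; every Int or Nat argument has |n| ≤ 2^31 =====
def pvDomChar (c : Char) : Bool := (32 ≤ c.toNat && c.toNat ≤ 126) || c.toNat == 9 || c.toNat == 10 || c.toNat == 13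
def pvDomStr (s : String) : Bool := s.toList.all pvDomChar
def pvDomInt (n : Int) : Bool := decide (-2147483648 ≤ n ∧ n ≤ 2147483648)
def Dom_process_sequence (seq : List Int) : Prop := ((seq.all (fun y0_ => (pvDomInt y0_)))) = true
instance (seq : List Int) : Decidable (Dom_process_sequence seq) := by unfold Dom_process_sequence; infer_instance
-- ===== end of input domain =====

-- B computes all four aggregates in one fold seeded from the first element, instead of A's
-- three library scans plus a product loop (alternative decomposition; return value only).

-- ===== PORT A =====
-- On the empty list Python A returns the string "The sequence is empty" (not a 4-tuple);
-- that input is excluded by Pre_ and the port returns a dummy there.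
def process_sequence (seq : List Int) : Int × Int × Int × Int :=
  let max_value := (PySem.List.max? seq (fun x => x)).getD 0
  let min_value := (PySem.List.min? seq (fun x => x)).getD 0
  let sum_value := seq.foldl (· + ·) 0
  let product_value := seq.foldl (fun acc num => acc * num) 1
  (max_value, min_value, sum_value, product_value)

-- ===== PORT B =====
def process_sequence_alt (seq : List Int) : Int × Int × Int × Int :=
  match seq with
  | [] => (0, 0, 0, 0)  -- unreachable under Pre_ (Python B returns a string here, like A)
  | h :: _ =>
    seq.foldl
      (fun (acc : Int × Int × Int × Int) num =>
        (if num > acc.1 then num else acc.1,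
         if num < acc.2.1 then num else acc.2.1,
         acc.2.2.1 + num,
         acc.2.2.2 * num))
      (h, h, 0, 1)

-- ===== PRECONDITION & SPEC =====
-- Pre_ excludes the empty list, on which A returns a string rather than a 4-tuple.
def Pre_process_sequence (seq : List Int) : Prop := seq ≠ []
instance (seq : List Int) : Decidable (Pre_process_sequence seq) := by unfold Pre_process_sequence; infer_instance
def pvWitness_process_sequence : List Int := [3, -1, 4]

def Spec_process_sequence (seq : List Int) (out : Int × Int × Int × Int) : Prop := out = process_sequence_alt seq
instance (seq : List Int) (out : Int × Int × Int × Int) : Decidable (Spec_process_sequence seq out) := by unfold Spec_process_sequence; infer_instance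

-- ===== CLAIM (what is proved, stated in full; the proofs are below) =====
def Claim_equal_process_sequence : Prop := ∀ (seq : List Int), Dom_process_sequence seq → Pre_process_sequence seq → Spec_process_sequence seq (process_sequence seq)

-- ===== LEMMAS AND PROOFS =====

lemma fold4_split (t : List Int) (a b s p : Int) :
    t.foldl
      (fun (acc : Int × Int × Int × Int) num =>
        (if num > acc.1 then num else acc.1,
         if num < acc.2.1 then num else acc.2.1,
         acc.2.2.1 + num,
         acc.2.2.2 * num))
      (a, b, s, p)
    = (t.foldl max a, t.foldl min b, t.foldl (· + ·) s, t.foldl (fun acc num => acc * num) p) := by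
  induction t generalizing a b s p with
  | nil => rfl
  | cons x xs ih =>
    simp only [List.foldl_cons, ih]
    congr 2
    · split_ifs <;> omega
    · congr 1
      split_ifs <;> omega

-- ===== VERDICT (by name: the statement is the Claim_ definition above) =====
theorem process_sequence_spec : Claim_equal_process_sequence := by
  intro seq _ hpre
  unfold Spec_process_sequence process_sequence process_sequence_alt
  match seq with
  | [] => exact absurd rfl hpre
  | h :: t =>
    simp only [List.foldl_cons, fold4_split]
    have : (if h > h then h else h) = h := by omega
    simp only [gt_iff_lt, lt_self_iff_false, if_false, zero_add, one_mul,
      PySem.List.max?_id_cons, PySem.List.min?_id_cons, Option.getD_some]
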